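-- pv_equiv track=rewrite | github.com/Noor-Nasri/daily-leetcode | 85-maximal-rectangle/maximal-rectangle.py | getLargestAreaGivenBase
-- ===== SOURCE A (Python) =====
-- def getLargestAreaGivenBase(oneSums, row_start, row_end, col_end):
--     # use BS to get min col where the whole rect is filled
--     low = 0
--     high = col_end
--     best = col_end
--
--     while low <= high:
--         col_start = (low + high) // 2
--
--         numOnes = oneSums[row_end][col_end]
--         if row_start:
--             numOnes -= oneSums[row_start - 1][col_end]
--         if col_start:
--             numOnes -= oneSums[row_end][col_start - 1]
--         if row_start and col_start:
--             numOnes += oneSums[row_start - 1][col_start - 1]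
--
--         expectedOnes = (row_end - row_start + 1) * (col_end - col_start + 1)
--         if numOnes == expectedOnes:
--             best = col_start
--             high = col_start - 1
--         else:
--             low = col_start + 1
--
--     return (row_end - row_start + 1) * (col_end - best + 1)
-- ===== SOURCE B (Python) =====
-- def getLargestAreaGivenBase(oneSums, row_start, row_end, col_end):
--     # Count, right to left, consecutive columns whose band sum equals the band
--     # height; no rectangle test is needed because on a prefix-sum matrix the
--     # rectangle [row_start..row_end] x [c..col_end] is full exactly when every
--     # column band in it holds height ones.
--     height = row_end - row_start + 1
--
--     def cell(i, j):
--         if i < 0 or j < 0: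
--             return 0
--         return oneSums[i][j]
--
--     def band(j):
--         return (cell(row_end, j) - cell(row_start - 1, j)
--                 - cell(row_end, j - 1) + cell(row_start - 1, j - 1))
--
--     best = col_end
--     if col_end >= 0 and band(col_end) == height:
--         j = col_end - 1
--         while j >= 0 and band(j) == height:
--             best = j
--             j -= 1
--     return height * (col_end - best + 1)
-- ===== Notes on version B (the rewrite author's own statement) =====
-- stated objective: simpler
-- what changed: Drops A's binary search and its per-probe rectangle inclusion-exclusion entirely: B computes each single column's band sum and counts, right to left from col_end, the consecutive columns whose band sum equals the band height (fullness of a rectangle on a prefix-sum matrix is exactly all its column bands being full), keeping best = col_end as default.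
-- outside the precondition, e.g. on getLargestAreaGivenBase([[1, 0, 1, 4]], 0, 0, 3): A returns 4, B returns 1; on getLargestAreaGivenBase([[1, 2], [2, 4]], -1, 1, 1): A returns 3, B returns 3; on getLargestAreaGivenBase([[1, 2]], 1, 0, 1): A returns 0, B returns 0
import Mathlib
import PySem

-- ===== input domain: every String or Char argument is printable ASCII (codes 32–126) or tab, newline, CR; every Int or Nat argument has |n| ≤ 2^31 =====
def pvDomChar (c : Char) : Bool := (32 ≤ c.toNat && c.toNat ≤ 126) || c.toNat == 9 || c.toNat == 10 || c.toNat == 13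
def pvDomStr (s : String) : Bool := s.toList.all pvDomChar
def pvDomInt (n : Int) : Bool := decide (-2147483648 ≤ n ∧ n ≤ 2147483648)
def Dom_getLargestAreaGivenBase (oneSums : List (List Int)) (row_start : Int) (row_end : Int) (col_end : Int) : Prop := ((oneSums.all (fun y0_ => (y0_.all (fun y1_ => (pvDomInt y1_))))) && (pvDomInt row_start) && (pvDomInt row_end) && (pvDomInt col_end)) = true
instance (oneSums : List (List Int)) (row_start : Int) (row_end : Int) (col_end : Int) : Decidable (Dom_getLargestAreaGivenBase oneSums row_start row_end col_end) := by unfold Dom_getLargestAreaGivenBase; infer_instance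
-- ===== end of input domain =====

-- B replaces A's binary search with rectangle tests by a right-to-left count of
-- consecutive columns whose band sum equals the band height (objective: simpler).

-- ===== PORT A =====
-- matrix access oneSums[i][j]: pyGet? is exact on in-range indices; the getD 0
-- default is only reached outside Pre_ (where Python raises IndexError)
def pvS (oneSums : List (List Int)) (i j : Int) : Int :=
  (PySem.List.pyGet? ((PySem.List.pyGet? oneSums i).getD []) j).getD 0

-- numOnes of A's loop body: inclusion-exclusion on the prefix-sum matrix,
-- with Python's truthiness tests `if row_start:` / `if col_start:` as ≠ 0
def rectOnes (oneSums : List (List Int)) (row_start row_end col_end col_start : Int) : Int :=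
  let n0 := pvS oneSums row_end col_end
  let n1 := if row_start ≠ 0 then n0 - pvS oneSums (row_start - 1) col_end else n0
  let n2 := if col_start ≠ 0 then n1 - pvS oneSums row_end (col_start - 1) else n1
  if row_start ≠ 0 ∧ col_start ≠ 0 then n2 + pvS oneSums (row_start - 1) (col_start - 1) else n2

-- A's while-loop: binary search for the least full col_start
def bsLoop (oneSums : List (List Int)) (row_start row_end col_end low high best : Int) : Int :=
  if _h : low ≤ high then
    let col_start := PySem.Int.floordiv (low + high) 2
    if rectOnes oneSums row_start row_end col_end col_start
        = (row_end - row_start + 1) * (col_end - col_start + 1) then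
      bsLoop oneSums row_start row_end col_end low (col_start - 1) col_start
    else
      bsLoop oneSums row_start row_end col_end (col_start + 1) high best
  else best
termination_by (high + 1 - low).toNat
decreasing_by
  · have := PySem.Int.floordiv_two_mid_bounds _h; omega
  · have := PySem.Int.floordiv_two_mid_bounds _h; omega

def getLargestAreaGivenBase (oneSums : List (List Int)) (row_start : Int) (row_end : Int) (col_end : Int) : Int :=
  (row_end - row_start + 1) * (col_end - bsLoop oneSums row_start row_end col_end 0 col_end col_end + 1)

-- ===== PORT B =====
-- Source B's cell(i, j): prefix value, 0 for the virtual row/column before index 0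
def pvCell (g : List (List Int)) (i j : Int) : Int :=
  if i < 0 ∨ j < 0 then 0
  else (PySem.List.pyGet? ((PySem.List.pyGet? g i).getD []) j).getD 0

-- Source B's band(j): number of ones of column j inside rows row_start..row_end
def pvBand (g : List (List Int)) (row_start row_end j : Int) : Int :=
  pvCell g row_end j - pvCell g (row_start - 1) j
    - pvCell g row_end (j - 1) + pvCell g (row_start - 1) (j - 1)

-- Source B's while loop: walk j downward while the column band is full
def scanB (g : List (List Int)) (row_start row_end height j best : Int) : Int :=
  if _h : 0 ≤ j then
    if pvBand g row_start row_end j = height then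
      scanB g row_start row_end height (j - 1) j
    else best
  else best
termination_by (j + 1).toNat
decreasing_by omega

def getLargestAreaGivenBase_alt (oneSums : List (List Int)) (row_start : Int) (row_end : Int) (col_end : Int) : Int :=
  let height := row_end - row_start + 1
  let best :=
    if 0 ≤ col_end ∧ pvBand oneSums row_start row_end col_end = height then
      scanB oneSums row_start row_end height (col_end - 1) col_end
    else col_end
  height * (col_end - best + 1)

-- ===== PRECONDITION & SPEC =====
-- column prefix of the queried row band: pvT j = ones in rows row_start..row_end, cols 0..j
def pvT (oneSums : List (List Int)) (row_start row_end j : Int) : Int :=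
  if j < 0 then 0
  else pvS oneSums row_end j - (if row_start ≠ 0 then pvS oneSums (row_start - 1) j else 0)

-- Pre_ excludes (besides out-of-range indices, on which A raises IndexError):
-- row_start > row_end or row_start < 0, and matrices whose per-column band sums
-- pvT j - pvT (j-1) leave [0, height] — i.e. oneSums is not a prefix-sum matrix of a
-- 0/1 grid over the queried band, so A's binary search probes a non-monotone fullness
-- test and its result is an accident of the probe sequence; the function's callers
-- always pass genuine prefix sums. (All rows are required longer than col_end, slightly
-- more than the two rows A reads, for simplicity.)
def Pre_getLargestAreaGivenBase (oneSums : List (List Int)) (row_start : Int) (row_end : Int) (col_end : Int) : Prop :=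
  col_end < 0 ∨
  (0 ≤ row_start ∧ row_start ≤ row_end ∧ row_end < (oneSums.length : Int) ∧
   (∀ row ∈ oneSums, col_end < (row.length : Int)) ∧
   (∀ k : ℕ, k < col_end.toNat + 1 →
     0 ≤ pvT oneSums row_start row_end (k : Int) - pvT oneSums row_start row_end ((k : Int) - 1) ∧
     pvT oneSums row_start row_end (k : Int) - pvT oneSums row_start row_end ((k : Int) - 1) ≤ row_end - row_start + 1))

instance (oneSums : List (List Int)) (row_start : Int) (row_end : Int) (col_end : Int) : Decidable (Pre_getLargestAreaGivenBase oneSums row_start row_end col_end) := by unfold Pre_getLargestAreaGivenBase; infer_instance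

def pvWitness_getLargestAreaGivenBase : List (List Int) × Int × Int × Int := ([[1, 2]], 0, 0, 1)

def Spec_getLargestAreaGivenBase (oneSums : List (List Int)) (row_start : Int) (row_end : Int) (col_end : Int) (out : Int) : Prop := out = getLargestAreaGivenBase_alt oneSums row_start row_end col_end
instance (oneSums : List (List Int)) (row_start : Int) (row_end : Int) (col_end : Int) (out : Int) : Decidable (Spec_getLargestAreaGivenBase oneSums row_start row_end col_end out) := by unfold Spec_getLargestAreaGivenBase; infer_instance

-- ===== CLAIM (what is proved, stated in full; the proofs are below) =====
def Claim_equal_getLargestAreaGivenBase : Prop := ∀ (oneSums : List (List Int)) (row_start : Int) (row_end : Int) (col_end : Int), Dom_getLargestAreaGivenBase oneSums row_start row_end col_end → Pre_getLargestAreaGivenBase oneSums row_start row_end col_end → Spec_getLargestAreaGivenBase oneSums row_start row_end col_end (getLargestAreaGivenBase oneSums row_start row_end col_end)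

-- ===== LEMMAS AND PROOFS =====

-- deficit of the fullness test at column b: 0 iff the rectangle [row band] × [b..ce] is full
def pvG (oneSums : List (List Int)) (rs re ce b : Int) : Int :=
  pvT oneSums rs re ce - pvT oneSums rs re (b - 1) - (re - rs + 1) * (ce - b + 1)

-- A's test expression equals the deficit formulation
theorem rectOnes_eq_pvT (oneSums : List (List Int)) (rs re ce c : Int)
    (hrs : 0 ≤ rs) (hc : 0 ≤ c) (hce : 0 ≤ ce) :
    rectOnes oneSums rs re ce c = pvT oneSums rs re ce - pvT oneSums rs re (c - 1) := by
  have hce' : ¬ ce < 0 := by omega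
  rcases eq_or_ne rs 0 with h1 | h1 <;> rcases eq_or_ne c 0 with h2 | h2
  · subst h1; subst h2
    norm_num [rectOnes, pvT, hce']
  · subst h1
    have hx : ¬ (c - 1 < 0) := by omega
    simp [rectOnes, pvT, hce', h2, hx]
  · subst h2
    norm_num [rectOnes, pvT, hce', h1]
  · have hx : ¬ (c - 1 < 0) := by omega
    simp [rectOnes, pvT, hce', h1, h2, hx]
    ring

-- B's band expression equals the difference of column prefixes
theorem pvBand_eq_pvT (g : List (List Int)) (rs re j : Int)
    (hrs : 0 ≤ rs) (hre : 0 ≤ re) (hj : 0 ≤ j) :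
    pvBand g rs re j = pvT g rs re j - pvT g rs re (j - 1) := by
  have hre' : ¬ re < 0 := by omega
  have hj' : ¬ j < 0 := by omega
  rcases eq_or_ne rs 0 with h1 | h1 <;> rcases eq_or_ne j 0 with h2 | h2
  · subst h1; subst h2
    norm_num [pvBand, pvCell, pvT, pvS, hre']
  · subst h1
    have hx : ¬ (j - 1 < 0) := by omega
    simp [pvBand, pvCell, pvT, pvS, hre', hj', hx]
  · subst h2
    have hx : ¬ (rs - 1 < 0) := by omega
    norm_num [pvBand, pvCell, pvT, pvS, hre', h1, hx]
  · have hx : ¬ (rs - 1 < 0) := by omega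
    have hy : ¬ (j - 1 < 0) := by omega
    simp [pvBand, pvCell, pvT, pvS, hre', hj', h1, hx, hy]
    omega

theorem pvG_mono (oneSums : List (List Int)) (rs re ce : Int)
    (hd : ∀ j : Int, 0 ≤ j → j ≤ ce →
      0 ≤ pvT oneSums rs re j - pvT oneSums rs re (j - 1) ∧
      pvT oneSums rs re j - pvT oneSums rs re (j - 1) ≤ re - rs + 1) :
    ∀ n : ℕ, ∀ a b : Int, (b - a).toNat ≤ n → 0 ≤ a → a ≤ b → b ≤ ce + 1 →
      pvG oneSums rs re ce a ≤ pvG oneSums rs re ce b := by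
  intro n
  induction n with
  | zero =>
    intro a b hn ha hab hb
    have hab' : a = b := by omega
    rw [hab']
  | succ n ih =>
    intro a b hn ha hab hb
    rcases eq_or_lt_of_le hab with h | h
    · rw [h]
    · have h1 : pvG oneSums rs re ce a ≤ pvG oneSums rs re ce (a + 1) := by
        have := hd a ha (by omega)
        unfold pvG
        have : a + 1 - 1 = a := by omega
        rw [this]
        nlinarith [ (hd a ha (by omega)).2 ]
      exact le_trans h1 (ih (a + 1) b (by omega) (by omega) (by omega) hb)

theorem pvG_ce_succ (oneSums : List (List Int)) (rs re ce : Int) :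
    pvG oneSums rs re ce (ce + 1) = 0 := by unfold pvG; ring

theorem pvG_nonpos (oneSums : List (List Int)) (rs re ce : Int)
    (hd : ∀ j : Int, 0 ≤ j → j ≤ ce →
      0 ≤ pvT oneSums rs re j - pvT oneSums rs re (j - 1) ∧
      pvT oneSums rs re j - pvT oneSums rs re (j - 1) ≤ re - rs + 1)
    (b : Int) (hb : 0 ≤ b) (hbce : b ≤ ce + 1) :
    pvG oneSums rs re ce b ≤ 0 := by
  have := pvG_mono oneSums rs re ce hd (ce + 1 - b).toNat b (ce + 1) (le_refl _) hb hbce (le_refl _)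
  rw [pvG_ce_succ] at this; exact this

-- full at a implies full at every b in [a, ce]
theorem pvG_full_mono (oneSums : List (List Int)) (rs re ce : Int)
    (hd : ∀ j : Int, 0 ≤ j → j ≤ ce →
      0 ≤ pvT oneSums rs re j - pvT oneSums rs re (j - 1) ∧
      pvT oneSums rs re j - pvT oneSums rs re (j - 1) ≤ re - rs + 1)
    (a b : Int) (ha : 0 ≤ a) (hab : a ≤ b) (hb : b ≤ ce)
    (hfa : pvG oneSums rs re ce a = 0) : pvG oneSums rs re ce b = 0 := by
  have h1 := pvG_mono oneSums rs re ce hd (b - a).toNat a b (le_refl _) ha hab (by omega)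
  have h2 := pvG_nonpos oneSums rs re ce hd b (by omega) (by omega)
  omega

-- ==== case Y : the band rectangle is full at some column; m = least such column ====

theorem bsLoop_eq_min (oneSums : List (List Int)) (rs re ce m : Int)
    (hrs : 0 ≤ rs) (hce : 0 ≤ ce) (hm0 : 0 ≤ m) (hmce : m ≤ ce)
    (hchar : ∀ c : Int, 0 ≤ c → c ≤ ce → (pvG oneSums rs re ce c = 0 ↔ m ≤ c)) :
    ∀ n : ℕ, ∀ low high best : Int, (high + 1 - low).toNat ≤ n →
      0 ≤ low → high ≤ ce → low ≤ m → m - 1 ≤ high →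
      (best = high + 1 ∨ (best = ce ∧ high = ce)) →
      bsLoop oneSums rs re ce low high best = m := by
  intro n
  induction n with
  | zero =>
    intro low high best hn h0 hhce hlm hmh hbest
    rw [bsLoop]
    have hlh : ¬ low ≤ high := by omega
    rw [dif_neg hlh]
    have hm : m = low := by omega
    rcases hbest with h | ⟨h1, h2⟩
    · omega
    · omega
  | succ n ih =>
    intro low high best hn h0 hhce hlm hmh hbest
    rw [bsLoop]
    by_cases hlh : low ≤ high
    · rw [dif_pos hlh]
      have hmid := PySem.Int.floordiv_two_mid_bounds hlh
      set c := PySem.Int.floordiv (low + high) 2 with hc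
      have hc0 : 0 ≤ c := by omega
      have hcce : c ≤ ce := by omega
      have htest : rectOnes oneSums rs re ce c = (re - rs + 1) * (ce - c + 1) ↔ m ≤ c := by
        rw [rectOnes_eq_pvT oneSums rs re ce c hrs hc0 hce]
        rw [← hchar c hc0 hcce]
        unfold pvG
        constructor <;> intro h <;> omega
      by_cases hfull : rectOnes oneSums rs re ce c = (re - rs + 1) * (ce - c + 1)
      · rw [if_pos hfull]
        have hmc : m ≤ c := htest.mp hfull
        exact ih low (c - 1) c (by omega) h0 (by omega) hlm (by omega) (Or.inl (by omega))
      · rw [if_neg hfull]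
        have hcm : c < m := by
          by_contra hcon
          exact hfull (htest.mpr (by omega))
        exact ih (c + 1) high best (by omega) (by omega) hhce (by omega) hmh hbest
    · rw [dif_neg hlh]
      rcases hbest with h | ⟨h1, h2⟩
      · omega
      · omega

theorem scanB_eq_min (oneSums : List (List Int)) (rs re ce m : Int)
    (hrs : 0 ≤ rs) (hre : 0 ≤ re) (hce : 0 ≤ ce) (hm0 : 0 ≤ m) (hmce : m ≤ ce)
    (hchar : ∀ c : Int, 0 ≤ c → c ≤ ce → (pvG oneSums rs re ce c = 0 ↔ m ≤ c)) :
    ∀ n : ℕ, ∀ c : Int, (c + 1).toNat ≤ n → c ≤ ce - 1 → m ≤ c + 1 →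
      scanB oneSums rs re (re - rs + 1) c (c + 1) = m := by
  intro n
  induction n with
  | zero =>
    intro c hn hcce hmc
    rw [scanB]
    have : ¬ 0 ≤ c := by omega
    rw [dif_neg this]
    omega
  | succ n ih =>
    intro c hn hcce hmc
    rw [scanB]
    by_cases hc0 : 0 ≤ c
    · rw [dif_pos hc0]
      -- the next rectangle is full: pvG (c+1) = 0, since m ≤ c + 1 ≤ ce
      have hnext : pvG oneSums rs re ce (c + 1) = 0 :=
        (hchar (c + 1) (by omega) (by omega)).mpr hmc
      have htest : pvBand oneSums rs re c = re - rs + 1 ↔ m ≤ c := by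
        rw [pvBand_eq_pvT oneSums rs re c hrs hre hc0]
        rw [← hchar c hc0 (by omega)]
        unfold pvG at hnext ⊢
        have hsplit : (re - rs + 1) * (ce - c + 1)
            = (re - rs + 1) * (ce - (c + 1) + 1) + (re - rs + 1) := by ring
        have hdrop : c + 1 - 1 = c := by omega
        rw [hdrop] at hnext
        constructor <;> intro h <;> omega
      by_cases hfull : pvBand oneSums rs re c = re - rs + 1
      · rw [if_pos hfull]
        have hmc' : m ≤ c := htest.mp hfull
        have := ih (c - 1) (by omega) (by omega) (by omega)
        have he : c - 1 + 1 = c := by omega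
        rw [he] at this
        exact this
      · rw [if_neg hfull]
        have : ¬ m ≤ c := fun h => hfull (htest.mpr h)
        omega
    · rw [dif_neg hc0]
      omega

-- ==== case N : no column is full ====

theorem bsLoop_none (oneSums : List (List Int)) (rs re ce : Int)
    (hrs : 0 ≤ rs) (hce : 0 ≤ ce)
    (hnone : ∀ c : Int, 0 ≤ c → c ≤ ce → pvG oneSums rs re ce c ≠ 0) :
    ∀ n : ℕ, ∀ low high best : Int, (high + 1 - low).toNat ≤ n →
      0 ≤ low → high ≤ ce →
      bsLoop oneSums rs re ce low high best = best := by
  intro n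
  induction n with
  | zero =>
    intro low high best hn h0 hhce
    rw [bsLoop]
    rw [dif_neg (by omega : ¬ low ≤ high)]
  | succ n ih =>
    intro low high best hn h0 hhce
    rw [bsLoop]
    by_cases hlh : low ≤ high
    · rw [dif_pos hlh]
      have hmid := PySem.Int.floordiv_two_mid_bounds hlh
      set c := PySem.Int.floordiv (low + high) 2 with hc
      have hfull : ¬ rectOnes oneSums rs re ce c = (re - rs + 1) * (ce - c + 1) := by
        rw [rectOnes_eq_pvT oneSums rs re ce c hrs (by omega) hce]
        have := hnone c (by omega) (by omega)
        unfold pvG at this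
        omega
      rw [if_neg hfull]
      exact ih (c + 1) high best (by omega) (by omega) hhce
    · rw [dif_neg hlh]

-- ===== VERDICT (by name: the statement is the Claim_ definition above) =====
theorem getLargestAreaGivenBase_spec : Claim_equal_getLargestAreaGivenBase := by
  intro oneSums rs re ce _hdom hpre
  unfold Spec_getLargestAreaGivenBase getLargestAreaGivenBase getLargestAreaGivenBase_alt
  dsimp only
  by_cases hce : 0 ≤ ce
  case neg =>
    -- col_end < 0: A's loop exits immediately, B's guard fails; best = col_end on both sides
    rw [bsLoop, dif_neg (by omega : ¬ (0 : Int) ≤ ce),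
        if_neg (by omega : ¬ (0 ≤ ce ∧ pvBand oneSums rs re ce = re - rs + 1))]
  case pos =>
  rcases hpre with hneg | ⟨hrs, hrse, _hlen, _hrows, hdk⟩
  · exact absurd hneg (by omega)
  ·
    have hre : 0 ≤ re := by omega
    -- the per-column condition, in Int form
    have hd : ∀ j : Int, 0 ≤ j → j ≤ ce →
        0 ≤ pvT oneSums rs re j - pvT oneSums rs re (j - 1) ∧
        pvT oneSums rs re j - pvT oneSums rs re (j - 1) ≤ re - rs + 1 := by
      intro j hj0 hjce
      have hk := hdk j.toNat (by omega)
      have hcast : ((j.toNat : Int)) = j := Int.toNat_of_nonneg hj0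
      rw [hcast] at hk
      exact hk
    by_cases hY : pvG oneSums rs re ce ce = 0
    · -- some column is full: let m be the least one (over ℕ, via Nat.find)
      have hex : ∃ k : ℕ, pvG oneSums rs re ce (k : Int) = 0 := by
        refine ⟨ce.toNat, ?_⟩
        rwa [Int.toNat_of_nonneg hce]
      set mN := Nat.find hex with hmN
      set m : Int := (mN : Int) with hm
      have hmfull : pvG oneSums rs re ce m = 0 := Nat.find_spec hex
      have hmce : m ≤ ce := by
        have : mN ≤ ce.toNat := Nat.find_min' hex (by rwa [Int.toNat_of_nonneg hce])
        omega
      have hm0 : 0 ≤ m := by positivity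
      have hchar : ∀ c : Int, 0 ≤ c → c ≤ ce → (pvG oneSums rs re ce c = 0 ↔ m ≤ c) := by
        intro c hc0 hcce
        constructor
        · intro hfc
          by_contra hcon
          have hlt : c.toNat < mN := by omega
          have := Nat.find_min hex hlt
          rw [Int.toNat_of_nonneg hc0] at this
          exact this hfc
        · intro hmc
          exact pvG_full_mono oneSums rs re ce hd m c hm0 hmc hcce hmfull
      rw [bsLoop_eq_min oneSums rs re ce m hrs hce hm0 hmce hchar
            (ce + 1 - 0).toNat 0 ce ce (le_refl _) (le_refl _) (le_refl _) hm0 (by omega)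
            (Or.inr ⟨rfl, rfl⟩)]
      -- B's guard holds: the column at col_end is full
      have hband : pvBand oneSums rs re ce = re - rs + 1 := by
        rw [pvBand_eq_pvT oneSums rs re ce hrs hre hce]
        have := hY
        unfold pvG at this
        omega
      rw [if_pos ⟨hce, hband⟩]
      have hscan := scanB_eq_min oneSums rs re ce m hrs hre hce hm0 hmce hchar
            ce.toNat (ce - 1) (by omega) (by omega) (by omega)
      have he : ce - 1 + 1 = ce := by omega
      rw [he] at hscan
      rw [hscan]
    · -- no column is full: best stays col_end on both sides
      have hnone : ∀ c : Int, 0 ≤ c → c ≤ ce → pvG oneSums rs re ce c ≠ 0 := by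
        intro c hc0 hcce hfc
        exact hY (pvG_full_mono oneSums rs re ce hd c ce hc0 hcce (le_refl _) hfc)
      rw [bsLoop_none oneSums rs re ce hrs hce hnone (ce + 1 - 0).toNat 0 ce ce (le_refl _) (le_refl _) (le_refl _)]
      have hband : ¬ pvBand oneSums rs re ce = re - rs + 1 := by
        rw [pvBand_eq_pvT oneSums rs re ce hrs hre hce]
        have := hnone ce hce (le_refl _)
        unfold pvG at this
        omega
      rw [if_neg (by exact fun h => hband h.2)]
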